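-- pv_equiv track=rewrite | github.com/tomabou/cpu_core | tools/asm.py | is_effect_line
-- ===== SOURCE A (Python) =====
-- def is_effect_line(string):
--     for i, c  in enumerate(string):
--         if c == '#':
--             return False
--         if c == ';':
--             return False
--         if c == '/':
--             if string[i+1] == '*':
--                 return False
--             else:
--                 return True
--         if c != ' ':
--             return True
--     return False
-- ===== SOURCE B (Python) =====
-- def is_effect_line(string):
--     # Right-to-left single pass: carry (answer for the suffix seen so far, its first char).
--     ans = False
--     nxt = None
--     for c in reversed(string):
--         if c == '#' or c == ';':
--             ans = False
--         elif c == '/':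
--             ans = nxt != '*'
--         elif c != ' ':
--             ans = True
--         # c == ' ': answer is that of the suffix, keep ans
--         nxt = c
--     return ans
-- ===== Notes on version B (the rewrite author's own statement) =====
-- stated objective: alternative
-- what changed: Replaced A's left-to-right indexed scan with string[i+1] lookahead by a right-to-left single pass that folds an accumulator (answer-for-the-suffix, first-char-of-the-suffix) over the reversed string.
-- outside the precondition, e.g. on is_effect_line('/'): A raises IndexError, B returns True
import Mathlib
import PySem

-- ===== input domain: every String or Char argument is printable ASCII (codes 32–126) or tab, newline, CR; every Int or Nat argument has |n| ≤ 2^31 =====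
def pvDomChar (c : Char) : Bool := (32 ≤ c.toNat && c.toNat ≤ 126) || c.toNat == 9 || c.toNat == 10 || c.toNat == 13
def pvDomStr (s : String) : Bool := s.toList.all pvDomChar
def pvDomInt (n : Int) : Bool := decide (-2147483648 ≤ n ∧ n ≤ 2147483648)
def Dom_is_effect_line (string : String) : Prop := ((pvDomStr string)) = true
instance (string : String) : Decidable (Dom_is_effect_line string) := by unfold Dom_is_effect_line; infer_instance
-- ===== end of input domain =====

-- B replaces A's left-to-right indexed scan (with string[i+1] lookahead) by a right-to-left
-- single pass carrying (answer-for-the-suffix, first-char-of-the-suffix) as an accumulator.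

-- ===== PORT A =====
-- loop 'for i, c in enumerate(string)'; `full` keeps the whole char list for string[i+1]
def isEffectLoop (full : List Char) : List Char → Nat → Bool
  | [], _ => false
  | c :: rest, i =>
    if c = '#' then false
    else if c = ';' then false
    else if c = '/' then
      -- string[i+1]; the none case is an IndexError, excluded by Pre_
      match PySem.List.pyGet? full ((i : Int) + 1) with
      | some ch => decide ¬ (ch = '*')
      | none => false
    else if c ≠ ' ' then true
    else isEffectLoop full rest (i + 1)

def is_effect_line (string : String) : Bool :=
  isEffectLoop string.toList string.toList 0

-- ===== PORT B =====
-- one iteration of B's loop body; state = (ans, nxt)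
def altStep (acc : Bool × Option Char) (c : Char) : Bool × Option Char :=
  let ans' :=
    if c = '#' ∨ c = ';' then false
    else if c = '/' then decide (acc.2 ≠ some '*')   -- nxt != '*'
    else if c ≠ ' ' then true
    else acc.1
  (ans', some c)

def is_effect_line_alt (string : String) : Bool :=
  (string.toList.reverse.foldl altStep (false, none)).1

-- ===== PRECONDITION & SPEC =====
-- Pre_ excludes exactly the strings whose stripped (of leading spaces) form is the single
-- character '/': there Python A raises IndexError on string[i+1].
def Pre_is_effect_line (string : String) : Prop :=
  string.toList.dropWhile (· = ' ') ≠ ['/']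
instance (string : String) : Decidable (Pre_is_effect_line string) := by
  unfold Pre_is_effect_line; infer_instance

def pvWitness_is_effect_line : String := "  code /* x"

def Spec_is_effect_line (string : String) (out : Bool) : Prop := out = is_effect_line_alt string
instance (string : String) (out : Bool) : Decidable (Spec_is_effect_line string out) := by unfold Spec_is_effect_line; infer_instance

-- ===== CLAIM (what is proved, stated in full; the proofs are below) =====
def Claim_equal_is_effect_line : Prop := ∀ (string : String), Dom_is_effect_line string → Pre_is_effect_line string → Spec_is_effect_line string (is_effect_line string)

-- ===== LEMMAS AND PROOFS =====

-- A's decision as a function of the stripped tail (what A's scan computes)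
def effectTailA (stripped : List Char) : Bool :=
  match stripped with
  | [] => false
  | c :: rest =>
    if c = '#' then false
    else if c = ';' then false
    else if c = '/' then
      match rest.head? with
      | some ch => decide ¬ (ch = '*')
      | none => false
    else true

-- the value B's backward fold computes for a suffix
def ansB : List Char → Bool
  | [] => false
  | c :: rest =>
    if c = '#' ∨ c = ';' then false
    else if c = '/' then decide (rest.head? ≠ some '*')
    else if c ≠ ' ' then true
    else ansB rest

theorem isEffectLoop_eq (full : List Char) :
    ∀ (suf : List Char) (i : Nat), full.drop i = suf →
      isEffectLoop full suf i = effectTailA (suf.dropWhile (· = ' ')) := by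
  intro suf
  induction suf with
  | nil => intro i h; simp [isEffectLoop, effectTailA]
  | cons c rest ih =>
    intro i h
    by_cases hsp : c = ' '
    · subst hsp
      have hdrop : full.drop (i + 1) = rest := by
        have := congrArg (List.drop 1) h
        simpa [List.drop_drop, Nat.add_comm] using this
      simp [isEffectLoop, List.dropWhile, ih (i + 1) hdrop]
    · have hdw : (c :: rest).dropWhile (· = ' ') = c :: rest := by
        simp [List.dropWhile, hsp]
      rw [hdw]
      by_cases h1 : c = '#'
      · simp [isEffectLoop, effectTailA, h1]
      · by_cases h2 : c = ';'
        · simp [isEffectLoop, effectTailA, h1, h2]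
        · by_cases h3 : c = '/'
          · have hdrop1 : full.drop (i + 1) = rest := by
              have := congrArg (List.drop 1) h
              simpa [List.drop_drop, Nat.add_comm] using this
            have hget : PySem.List.pyGet? full ((i : Int) + 1) = rest.head? := by
              have hc : ((i : Int) + 1) = ((i + 1 : Nat) : Int) := by push_cast; ring
              rw [hc, PySem.List.pyGet?_natCast, ← hdrop1]
              simp [List.getElem?_drop, List.head?_eq_getElem?]
            simp [isEffectLoop, effectTailA, h3, hget]
          · simp [isEffectLoop, effectTailA, h1, h2, h3, hsp]

-- B's backward fold computes (ansB l, l.head?)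
theorem foldB (l : List Char) :
    l.reverse.foldl altStep (false, none) = (ansB l, l.head?) := by
  rw [List.foldl_reverse]
  induction l with
  | nil => rfl
  | cons c rest ih =>
    simp only [List.foldr_cons, ih]
    by_cases h1 : c = '#' ∨ c = ';'
    · simp [altStep, ansB, h1]
    · by_cases h2 : c = '/'
      · simp [altStep, ansB, h1, h2]
      · by_cases h3 : c = ' '
        · simp [altStep, ansB, h1, h2, h3]
        · simp [altStep, ansB, h1, h2, h3]

theorem ansB_eq (l : List Char) (hpre : l.dropWhile (· = ' ') ≠ ['/']) :
    ansB l = effectTailA (l.dropWhile (· = ' ')) := by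
  induction l with
  | nil => simp [ansB, effectTailA]
  | cons c rest ih =>
    by_cases hsp : c = ' '
    · subst hsp
      have hdw : ((' ' :: rest).dropWhile (· = ' ')) = rest.dropWhile (· = ' ') := by
        simp [List.dropWhile]
      rw [hdw] at hpre ⊢
      simpa [ansB] using ih hpre
    · have hdw : (c :: rest).dropWhile (· = ' ') = c :: rest := by
        simp [List.dropWhile, hsp]
      rw [hdw] at hpre ⊢
      by_cases h1 : c = '#' ∨ c = ';'
      · rcases h1 with h | h <;> simp [ansB, effectTailA, h]
      · by_cases h2 : c = '/'
        · subst h2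
          cases rest with
          | nil => exact absurd rfl hpre
          | cons ch r => simp [ansB, effectTailA, h1]
        · push_neg at h1
          simp [ansB, effectTailA, h1.1, h1.2, h2, hsp]

-- ===== VERDICT (by name: the statement is the Claim_ definition above) =====
theorem is_effect_line_spec : Claim_equal_is_effect_line := by
  intro s _ hpre
  unfold Spec_is_effect_line is_effect_line is_effect_line_alt
  rw [foldB, isEffectLoop_eq s.toList s.toList 0 (by simp),
      ansB_eq s.toList hpre]
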